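-- pv_equiv track=rewrite | github.com/innewiadro/Codewars | kata_level7/Are_the_twins_even/Are_the_twins_even.py | even_twins
-- ===== SOURCE A (Python) =====
-- def even_twins(arr):
--     even_sums = set()
--     n = len(arr)
--     for i in range(n):
--         for j in range(i + 1, n):
--             s = arr[i] + arr[j]
--             if s % 2 == 0:
--                 even_sums.add(s)
--     return len(even_sums)
-- ===== SOURCE B (Python) =====
-- def even_twins(arr):
--     evens = [x for x in arr if x % 2 == 0]
--     odds = [x for x in arr if x % 2 != 0]
--     sums = set()
--     for bucket in (evens, odds):
--         while bucket:
--             x, bucket = bucket[0], bucket[1:]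
--             for y in bucket:
--                 sums.add(x + y)
--     return len(sums)
-- ===== Notes on version B (the rewrite author's own statement) =====
-- stated objective: alternative
-- what changed: B partitions the array by parity once and enumerates head-vs-tail pairs inside each bucket only, so no per-pair modulo test and no index arithmetic; A tests every index pair's sum for evenness.
import Mathlib
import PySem

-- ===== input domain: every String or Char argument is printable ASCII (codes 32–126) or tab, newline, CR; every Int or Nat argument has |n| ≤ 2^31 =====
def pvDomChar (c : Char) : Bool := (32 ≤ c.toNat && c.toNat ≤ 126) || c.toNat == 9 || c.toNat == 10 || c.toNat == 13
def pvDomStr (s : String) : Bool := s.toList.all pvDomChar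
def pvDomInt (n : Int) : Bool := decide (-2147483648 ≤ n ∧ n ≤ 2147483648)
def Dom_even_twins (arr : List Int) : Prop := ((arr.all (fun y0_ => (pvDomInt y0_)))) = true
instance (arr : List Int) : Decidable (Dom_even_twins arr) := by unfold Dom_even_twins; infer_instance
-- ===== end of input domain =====

-- B re-implements A by partitioning the array by parity once and enumerating head-vs-tail
-- pairs inside each bucket, removing the per-pair evenness test; same asymptotic cost.

-- ===== PORT A =====
def even_twins (arr : List Int) : Int :=
  let n : Int := arr.length
  let even_sums : PySem.Set Int :=
    (PySem.List.pyRange 0 n 1).foldl (fun es i =>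
      (PySem.List.pyRange (i + 1) n 1).foldl (fun es j =>
        let s := PySem.List.pyGetD arr i 0 + PySem.List.pyGetD arr j 0
        if PySem.Int.mod s 2 == 0 then PySem.Set.add es s else es) es)
      PySem.Set.empty
  (even_sums.length : Int)

-- ===== PORT B =====
-- 'while bucket: x, bucket = bucket[0], bucket[1:]; for y in bucket: sums.add(x+y)'
def pvPairSums : List Int → PySem.Set Int → PySem.Set Int
  | [], sums => sums
  | x :: bucket, sums =>
      pvPairSums bucket (bucket.foldl (fun s y => PySem.Set.add s (x + y)) sums)

def even_twins_alt (arr : List Int) : Int :=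
  let evens := arr.filter (fun x => PySem.Int.mod x 2 == 0)
  let odds := arr.filter (fun x => !(PySem.Int.mod x 2 == 0))
  let sums := pvPairSums odds (pvPairSums evens PySem.Set.empty)
  (sums.length : Int)

-- ===== PRECONDITION & SPEC =====
def Spec_even_twins (arr : List Int) (out : Int) : Prop := out = even_twins_alt arr
instance (arr : List Int) (out : Int) : Decidable (Spec_even_twins arr out) := by unfold Spec_even_twins; infer_instance

-- ===== CLAIM (what is proved, stated in full; the proofs are below) =====
def Claim_equal_even_twins : Prop := ∀ (arr : List Int), Dom_even_twins arr → Spec_even_twins arr (even_twins arr)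

-- ===== LEMMAS AND PROOFS =====

/-- Generic membership through a fold whose step adds elements described by `Q`. -/
lemma mem_foldl_step {α β : Type} (F : List α → β → List α) (Q : β → α → Prop)
    (h : ∀ es i y, y ∈ F es i ↔ y ∈ es ∨ Q i y) :
    ∀ (l : List β) (es : List α) (y : α), y ∈ l.foldl F es ↔ y ∈ es ∨ ∃ i ∈ l, Q i y := by
  intro l
  induction l with
  | nil => simp
  | cons b t ih =>
    intro es y
    simp only [List.foldl_cons, ih, h, List.mem_cons]
    constructor
    · rintro (h1 | ⟨i, hi, hq⟩)
      · rcases h1 with h1 | h1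
        · exact Or.inl h1
        · exact Or.inr ⟨b, Or.inl rfl, h1⟩
      · exact Or.inr ⟨i, Or.inr hi, hq⟩
    · rintro (h1 | ⟨i, hi | hi, hq⟩)
      · exact Or.inl (Or.inl h1)
      · exact Or.inl (Or.inr (hi ▸ hq))
      · exact Or.inr ⟨i, hi, hq⟩

/-- Generic Nodup preservation through a fold. -/
lemma nodup_foldl_step {α β : Type} (F : List α → β → List α)
    (h : ∀ es i, es.Nodup → (F es i).Nodup) :
    ∀ (l : List β) (es : List α), es.Nodup → (l.foldl F es).Nodup := by
  intro l
  induction l with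
  | nil => intro es hn; simpa using hn
  | cons b t ih => intro es hn; exact ih _ (h es b hn)

/-- A length-2 sublist is a pair of positions `i < j`. -/
lemma pair_sublist_iff (a b : Int) :
    ∀ (l : List Int), (List.Sublist [a, b] l) ↔
      ∃ i j : Nat, i < j ∧ j < l.length ∧ l.getD i 0 = a ∧ l.getD j 0 = b := by
  intro l
  induction l with
  | nil => simp
  | cons x t ih =>
    constructor
    · intro h
      cases h with
      | cons _ h' =>
        rcases ih.mp h' with ⟨i, j, hij, hj, ha, hb⟩
        exact ⟨i + 1, j + 1, by omega, by simpa using by omega, by simpa using ha, by simpa using hb⟩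
      | cons₂ _ h' =>
        have hb : b ∈ t := List.singleton_sublist.mp h'
        rcases List.mem_iff_getElem.mp hb with ⟨k, hk, hbk⟩
        refine ⟨0, k + 1, by omega, by simpa using by omega, by simp, ?_⟩
        rw [List.getD_cons_succ, List.getD_eq_getElem t 0 hk]
        exact hbk
    · rintro ⟨i, j, hij, hj, ha, hb⟩
      cases i with
      | zero =>
        have hx : x = a := by simpa using ha
        obtain ⟨j', rfl⟩ : ∃ j', j = j' + 1 := ⟨j - 1, by omega⟩
        have hj' : j' < t.length := by simpa using hj
        have hbt : b ∈ t := by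
          have := List.getD_eq_getElem t 0 hj'
          simp only [List.getD_cons_succ] at hb
          rw [hb] at this; exact this ▸ List.getElem_mem hj'
        exact hx ▸ List.Sublist.cons₂ _ (List.singleton_sublist.mpr hbt)
      | succ i' =>
        obtain ⟨j', rfl⟩ : ∃ j', j = j' + 1 := ⟨j - 1, by omega⟩
        apply List.Sublist.cons
        exact (ih).mpr ⟨i', j', by omega, by simpa using hj, by simpa using ha, by simpa using hb⟩

/-- Membership in B's bucket loop. -/
lemma mem_pvPairSums :
    ∀ (l : List Int) (s : PySem.Set Int) (y : Int),
      y ∈ pvPairSums l s ↔ y ∈ s ∨ ∃ a b : Int, List.Sublist [a, b] l ∧ y = a + b := by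
  intro l
  induction l with
  | nil => intro s y; simp [pvPairSums]
  | cons x t ih =>
    intro s y
    rw [pvPairSums, ih, PySem.Set.mem_foldl_add]
    constructor
    · rintro (⟨hy | ⟨b, hb, rfl⟩⟩ | ⟨a, b, hab, rfl⟩)
      · exact Or.inl hy
      · exact Or.inr ⟨x, b, List.Sublist.cons₂ _ (List.singleton_sublist.mpr hb), rfl⟩
      · exact Or.inr ⟨a, b, List.Sublist.cons _ hab, rfl⟩
    · rintro (hy | ⟨a, b, hab, rfl⟩)
      · exact Or.inl (Or.inl hy)
      · cases hab with
        | cons _ h' => exact Or.inr ⟨a, b, h', rfl⟩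
        | cons₂ _ h' => exact Or.inl (Or.inr ⟨b, List.singleton_sublist.mp h', rfl⟩)

/-- Nodup of B's bucket loop result. -/
lemma nodup_pvPairSums :
    ∀ (l : List Int) (s : PySem.Set Int), s.Nodup → (pvPairSums l s).Nodup := by
  intro l
  induction l with
  | nil => intro s hs; simpa [pvPairSums] using hs
  | cons x t ih =>
    intro s hs
    rw [pvPairSums]
    exact ih _ (nodup_foldl_step _ (fun es i h => PySem.Set.nodup_add _ _ h) t s hs)

/-- Even pair-sums of `l` are exactly the pair-sums of the parity buckets. -/
lemma parity_split (y : Int) :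
    ∀ (l : List Int),
      (∃ a b : Int, List.Sublist [a, b] l ∧ (a + b) % 2 = 0 ∧ y = a + b) ↔
      ((∃ a b : Int, List.Sublist [a, b] (l.filter (fun x => PySem.Int.mod x 2 == 0)) ∧ y = a + b) ∨
       (∃ a b : Int, List.Sublist [a, b] (l.filter (fun x => !(PySem.Int.mod x 2 == 0))) ∧ y = a + b)) := by
  have hmod : ∀ x : Int, (PySem.Int.mod x 2 == 0) = decide (x % 2 = 0) := by
    intro x
    rw [PySem.Int.mod_eq_emod_of_pos (by norm_num)]
    cases h : decide (x % 2 = 0) with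
    | true => simp at h; simp [h]
    | false => simp at h; simp [h]
  have pair_cons : ∀ (a b x : Int) (t : List Int),
      (List.Sublist [a, b] (x :: t)) ↔ (List.Sublist [a, b] t ∨ (a = x ∧ b ∈ t)) := by
    intro a b x t
    constructor
    · intro h
      cases h with
      | cons _ h' => exact Or.inl h'
      | cons₂ _ h' => exact Or.inr ⟨rfl, List.singleton_sublist.mp h'⟩
    · rintro (h | ⟨rfl, hb⟩)
      · exact List.Sublist.cons _ h
      · exact List.Sublist.cons₂ _ (List.singleton_sublist.mpr hb)
  intro l
  induction l with
  | nil => simp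
  | cons x t ih =>
    by_cases hx : x % 2 = 0
    · have hf1 : (x :: t).filter (fun x => PySem.Int.mod x 2 == 0)
          = x :: t.filter (fun x => PySem.Int.mod x 2 == 0) := by
        simp [hx]
      have hf2 : (x :: t).filter (fun x => !(PySem.Int.mod x 2 == 0))
          = t.filter (fun x => !(PySem.Int.mod x 2 == 0)) := by
        simp [hx]
      rw [hf1, hf2]
      constructor
      · rintro ⟨a, b, hab, heven, rfl⟩
        rcases (pair_cons a b x t).mp hab with h | ⟨rfl, hb⟩
        · rcases ih.mp ⟨a, b, h, heven, rfl⟩ with h' | h'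
          · exact Or.inl (by
              rcases h' with ⟨a', b', hab', he⟩
              exact ⟨a', b', (pair_cons a' b' x _).mpr (Or.inl hab'), he⟩)
          · exact Or.inr h'
        · refine Or.inl ⟨a, b, (pair_cons a b _ _).mpr (Or.inr ⟨rfl, ?_⟩), rfl⟩
          simp only [List.mem_filter, hmod]
          exact ⟨hb, by simp; omega⟩
      · rintro (⟨a, b, hab, rfl⟩ | ⟨a, b, hab, rfl⟩)
        · rcases (pair_cons a b x _).mp hab with h | ⟨rfl, hb⟩
          · rcases ih.mpr (Or.inl ⟨a, b, h, rfl⟩) with ⟨a', b', hab', he, hy⟩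
            exact ⟨a', b', (pair_cons a' b' x t).mpr (Or.inl hab'), he, hy⟩
          · have hbm := List.mem_filter.mp hb
            have hbe : b % 2 = 0 := by
              have := hbm.2; rw [hmod] at this; simpa using this
            exact ⟨a, b, (pair_cons a b a t).mpr (Or.inr ⟨rfl, hbm.1⟩), by omega, rfl⟩
        · rcases ih.mpr (Or.inr ⟨a, b, hab, rfl⟩) with ⟨a', b', hab', he, hy⟩
          exact ⟨a', b', (pair_cons a' b' x t).mpr (Or.inl hab'), he, hy⟩
    · have hf1 : (x :: t).filter (fun x => PySem.Int.mod x 2 == 0)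
          = t.filter (fun x => PySem.Int.mod x 2 == 0) := by
        simp [hx]
      have hf2 : (x :: t).filter (fun x => !(PySem.Int.mod x 2 == 0))
          = x :: t.filter (fun x => !(PySem.Int.mod x 2 == 0)) := by
        simp [hx]
      rw [hf1, hf2]
      constructor
      · rintro ⟨a, b, hab, heven, rfl⟩
        rcases (pair_cons a b x t).mp hab with h | ⟨rfl, hb⟩
        · rcases ih.mp ⟨a, b, h, heven, rfl⟩ with h' | h'
          · exact Or.inl h'
          · exact Or.inr (by
              rcases h' with ⟨a', b', hab', he⟩
              exact ⟨a', b', (pair_cons a' b' x _).mpr (Or.inl hab'), he⟩)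
        · refine Or.inr ⟨a, b, (pair_cons a b _ _).mpr (Or.inr ⟨rfl, ?_⟩), rfl⟩
          simp only [List.mem_filter, hmod]
          exact ⟨hb, by simp; omega⟩
      · rintro (⟨a, b, hab, rfl⟩ | ⟨a, b, hab, rfl⟩)
        · rcases ih.mpr (Or.inl ⟨a, b, hab, rfl⟩) with ⟨a', b', hab', he, hy⟩
          exact ⟨a', b', (pair_cons a' b' x t).mpr (Or.inl hab'), he, hy⟩
        · rcases (pair_cons a b x _).mp hab with h | ⟨rfl, hb⟩
          · rcases ih.mpr (Or.inr ⟨a, b, h, rfl⟩) with ⟨a', b', hab', he, hy⟩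
            exact ⟨a', b', (pair_cons a' b' x t).mpr (Or.inl hab'), he, hy⟩
          · have hbm := List.mem_filter.mp hb
            have hbo : ¬ b % 2 = 0 := by
              have := hbm.2; rw [hmod] at this; simpa using this
            exact ⟨a, b, (pair_cons a b a t).mpr (Or.inr ⟨rfl, hbm.1⟩), by omega, rfl⟩

/-- Membership in A's result set: some even pair-sum over index pairs `i < j`. -/
lemma mem_even_twins_set (arr : List Int) (y : Int) :
    y ∈ ((PySem.List.pyRange 0 (arr.length : Int) 1).foldl (fun es i =>
      (PySem.List.pyRange (i + 1) (arr.length : Int) 1).foldl (fun es j =>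
        let s := PySem.List.pyGetD arr i 0 + PySem.List.pyGetD arr j 0
        if PySem.Int.mod s 2 == 0 then PySem.Set.add es s else es) es)
      PySem.Set.empty) ↔
    ∃ a b : Int, List.Sublist [a, b] arr ∧ (a + b) % 2 = 0 ∧ y = a + b := by
  rw [mem_foldl_step _
    (fun i y => ∃ j ∈ PySem.List.pyRange (i + 1) (arr.length : Int) 1,
        (PySem.Int.mod (PySem.List.pyGetD arr i 0 + PySem.List.pyGetD arr j 0) 2 == 0) = true ∧
        y = PySem.List.pyGetD arr i 0 + PySem.List.pyGetD arr j 0)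
    (fun es i y => by
      rw [mem_foldl_step _
        (fun j y => (PySem.Int.mod (PySem.List.pyGetD arr i 0 + PySem.List.pyGetD arr j 0) 2 == 0) = true ∧
            y = PySem.List.pyGetD arr i 0 + PySem.List.pyGetD arr j 0)
        (fun es j y => by
          simp only
          split
          · rename_i hc
            rw [PySem.Set.mem_add]
            constructor
            · rintro (h | rfl); exacts [Or.inl h, Or.inr ⟨hc, rfl⟩]
            · rintro (h | ⟨_, rfl⟩); exacts [Or.inl h, Or.inr rfl]
          · rename_i hc
            constructor
            · intro h; exact Or.inl h
            · rintro (h | ⟨hc', _⟩); exacts [h, absurd hc' hc])])]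
  simp only [PySem.Set.empty, List.not_mem_nil, false_or, PySem.List.mem_pyRange_one]
  constructor
  · rintro ⟨i, ⟨hi0, hin⟩, j, ⟨hji, hjn⟩, hc, rfl⟩
    have hi' : i = ((i.toNat : Nat) : Int) := (Int.toNat_of_nonneg hi0).symm
    have hj' : j = ((j.toNat : Nat) : Int) := (Int.toNat_of_nonneg (by omega)).symm
    rw [hi', hj', PySem.List.pyGetD_natCast, PySem.List.pyGetD_natCast] at hc ⊢
    refine ⟨arr.getD i.toNat 0, arr.getD j.toNat 0,
      (pair_sublist_iff _ _ arr).mpr ⟨i.toNat, j.toNat, by omega, by omega, rfl, rfl⟩, ?_, rfl⟩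
    rw [PySem.Int.mod_eq_emod_of_pos (by norm_num)] at hc
    simpa using hc
  · rintro ⟨a, b, hab, heven, rfl⟩
    rcases (pair_sublist_iff a b arr).mp hab with ⟨i, j, hij, hjl, ha, hb⟩
    refine ⟨(i : Int), ⟨by omega, by exact_mod_cast by omega⟩,
      (j : Int), ⟨by exact_mod_cast by omega, by exact_mod_cast hjl⟩, ?_, ?_⟩
    · rw [PySem.List.pyGetD_natCast, PySem.List.pyGetD_natCast, ha, hb,
        PySem.Int.mod_eq_emod_of_pos (by norm_num)]
      simpa using heven
    · rw [PySem.List.pyGetD_natCast, PySem.List.pyGetD_natCast, ha, hb]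

-- ===== VERDICT (by name: the statement is the Claim_ definition above) =====
theorem even_twins_spec : Claim_equal_even_twins := by
  intro arr _
  unfold Spec_even_twins even_twins even_twins_alt
  refine congrArg (fun n : Nat => (n : Int)) ?_
  refine List.Perm.length_eq ?_
  refine (List.perm_ext_iff_of_nodup ?_ ?_).mpr ?_
  · exact nodup_foldl_step _ (fun es i h => nodup_foldl_step _
      (fun es' j h' => by dsimp only; split
                          · exact PySem.Set.nodup_add _ _ h'
                          · exact h') _ _ h) _ _ (by simp [PySem.Set.empty])
  · exact nodup_pvPairSums _ _ (nodup_pvPairSums _ _ (by simp [PySem.Set.empty]))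
  · intro y
    rw [mem_even_twins_set, mem_pvPairSums, mem_pvPairSums]
    simp only [PySem.Set.empty, List.not_mem_nil, false_or]
    exact parity_split y arr
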